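-- pv_equiv track=rewrite | github.com/andres-vs/master-thesis | Data prepping and analysis/preprocess_comments.py | tag_pattern_category
-- ===== SOURCE A (Python) =====
-- def tag_pattern_category(comment, patterns):
--     matching_categories = []
--     for category, keywords in patterns.items():
--         for keyword in keywords:
--             if keyword in comment:
--                 matching_categories.append(category)
--                 break  # Avoid adding the same category multiple times
--     return matching_categories if matching_categories else ['other']
-- ===== SOURCE B (Python) =====
-- def tag_pattern_category(comment, patterns):
--     lengths = {len(k) for kws in patterns.values() for k in kws}
--     index = {comment[i:i+L] for L in lengths for i in range(len(comment) - L + 1)}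
--     matched = [cat for cat, kws in patterns.items()
--                if any(k in index for k in kws)]
--     return matched if matched else ['other']
-- ===== Notes on version B (the rewrite author's own statement) =====
-- stated objective: faster
-- what changed: Instead of scanning the comment once per keyword, B precomputes a hash set of all comment substrings of the occurring keyword lengths, so every per-keyword substring scan becomes one O(|keyword|) set-membership lookup.
import Mathlib
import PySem

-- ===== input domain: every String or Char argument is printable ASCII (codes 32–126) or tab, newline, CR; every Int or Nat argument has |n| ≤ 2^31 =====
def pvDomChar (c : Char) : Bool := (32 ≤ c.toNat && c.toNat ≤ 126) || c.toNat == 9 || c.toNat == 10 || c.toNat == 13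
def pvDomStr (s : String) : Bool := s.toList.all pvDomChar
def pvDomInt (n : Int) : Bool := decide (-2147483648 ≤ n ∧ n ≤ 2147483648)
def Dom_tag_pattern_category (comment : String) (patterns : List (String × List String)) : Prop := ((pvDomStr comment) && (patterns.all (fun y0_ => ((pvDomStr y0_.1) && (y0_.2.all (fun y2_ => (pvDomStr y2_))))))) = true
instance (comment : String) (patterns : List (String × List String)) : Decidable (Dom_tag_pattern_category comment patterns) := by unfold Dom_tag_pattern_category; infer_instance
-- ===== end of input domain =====

-- B replaces A's per-category substring rescans of the comment by a precomputed set of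
-- all comment substrings of the occurring keyword lengths, so each keyword test is one
-- set-membership lookup (objective: alternative).


-- ===== PORT A =====
-- Inner 'for keyword in keywords: if keyword in comment: append; break' loop of A.
def pvScanKeywords (comment : String) (acc : List String) (category : String) : List String → List String
  | [] => acc
  | k :: ks => if PySem.Str.isIn k comment then acc ++ [category]
               else pvScanKeywords comment acc category ks

def tag_pattern_category (comment : String) (patterns : List (String × List String)) : List String :=
  let matching := ((PySem.Dict.ofList patterns).items).foldl
      (fun acc p => pvScanKeywords comment acc p.1 p.2) ([] : List String)
  if matching.isEmpty then ["other"] else matching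

-- ===== PORT B =====
def tag_pattern_category_alt (comment : String) (patterns : List (String × List String)) : List String :=
  let items := (PySem.Dict.ofList patterns).items
  let lengths : PySem.Set Int :=
    PySem.Set.ofList (items.flatMap (fun p => p.2.map (fun k => PySem.Str.len k)))
  let index : PySem.Set String :=
    PySem.Set.ofList (lengths.flatMap (fun L =>
      (PySem.List.pyRange 0 (PySem.Str.len comment - L + 1) 1).map
        (fun i => PySem.Str.slice comment (some i) (some (i + L)))))
  let matched := (items.filter (fun p => p.2.any (fun k => PySem.Set.contains index k))).map
      (fun p => p.1)
  if matched.isEmpty then ["other"] else matched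

-- ===== PRECONDITION & SPEC =====
def Spec_tag_pattern_category (comment : String) (patterns : List (String × List String)) (out : List String) : Prop := out = tag_pattern_category_alt comment patterns
instance (comment : String) (patterns : List (String × List String)) (out : List String) : Decidable (Spec_tag_pattern_category comment patterns out) := by unfold Spec_tag_pattern_category; infer_instance

-- ===== CLAIM (what is proved, stated in full; the proofs are below) =====
def Claim_equal_tag_pattern_category : Prop := ∀ (comment : String) (patterns : List (String × List String)), Dom_tag_pattern_category comment patterns → Spec_tag_pattern_category comment patterns (tag_pattern_category comment patterns)

-- ===== LEMMAS AND PROOFS =====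

-- Bool-valued `any` congruence on the members of the list.
theorem pv_any_congr {a : Type} {l : List a} {f g : a → Bool}
    (h : ∀ x ∈ l, f x = g x) : l.any f = l.any g := by
  induction l with
  | nil => rfl
  | cons x t ih =>
    rw [List.any_cons, List.any_cons, h x (by simp),
      ih (fun b hb => h b (List.mem_cons_of_mem x hb))]

-- B's index set contains exactly the substrings of the comment whose length occurs in ls.
theorem pv_contains_index (comment : String) (ls : List Int) (k : String)
    (hk : PySem.Str.len k ∈ ls) (hls : ∀ L ∈ ls, 0 ≤ L) :
    PySem.Set.contains
      (PySem.Set.ofList (ls.flatMap (fun L =>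
        (PySem.List.pyRange 0 (PySem.Str.len comment - L + 1) 1).map
          (fun i => PySem.Str.slice comment (some i) (some (i + L)))))) k
      = PySem.Str.isIn k comment := by
  by_cases h : PySem.Str.isIn k comment = true
  · rw [h, PySem.Set.contains_iff, PySem.Set.mem_ofList, List.mem_flatMap]
    rcases (PySem.Str.isIn_iff_infix k comment).mp h with ⟨pre, suf, hps⟩
    refine ⟨PySem.Str.len k, hk, ?_⟩
    rw [List.mem_map]
    have hlen : pre.length + k.toList.length + suf.length = comment.toList.length := by
      rw [← hps]; simp; omega
    refine ⟨(pre.length : Int), ?_, ?_⟩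
    · rw [PySem.List.mem_pyRange_one]
      rw [PySem.Str.len_eq, PySem.Str.len_eq]
      constructor
      · exact_mod_cast Nat.zero_le _
      · omega
    · apply String.ext
      rw [PySem.Str.toList_slice, PySem.Chars.slice_eq_listSlice]
      have hcast : (pre.length : Int) + PySem.Str.len k
          = ((pre.length + k.toList.length : Nat) : Int) := by
        rw [PySem.Str.len_eq]; push_cast; ring
      rw [hcast, PySem.List.slice_natCast, ← hps]
      simp
  · rw [eq_false_of_ne_true h]
    rw [← Bool.not_eq_true]
    intro hc
    apply h
    rw [PySem.Set.contains_iff, PySem.Set.mem_ofList, List.mem_flatMap] at hc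
    rcases hc with ⟨L, hLmem, hmap⟩
    rw [List.mem_map] at hmap
    rcases hmap with ⟨i, hi, hsl⟩
    rw [PySem.List.mem_pyRange_one] at hi
    rw [PySem.Str.isIn_eq, ← PySem.Chars.exists_prefix_drop_iff_isIn]
    refine ⟨i.toNat, ?_⟩
    have h0i : (0:Int) ≤ i := hi.1
    have hL : (0:Int) ≤ L := hls L hLmem
    have hkt : k.toList = List.take ((i+L).toNat - i.toNat) (List.drop i.toNat comment.toList) := by
      rw [← hsl, PySem.Str.toList_slice, PySem.Chars.slice_eq_listSlice,
        PySem.List.slice_toNat _ h0i (by omega)]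
    rw [hkt]; exact List.take_prefix _ _

-- A's inner loop appends the category exactly when some keyword matches.
theorem pvScanKeywords_eq (comment : String) (acc : List String) (cat : String) (ks : List String) :
    pvScanKeywords comment acc cat ks
      = if ks.any (fun k => PySem.Str.isIn k comment) then acc ++ [cat] else acc := by
  induction ks with
  | nil => simp [pvScanKeywords]
  | cons k ks ih =>
    rw [pvScanKeywords, List.any_cons]
    cases h : PySem.Str.isIn k comment
    · rw [Bool.false_or, if_neg Bool.false_ne_true, ih]
    · rw [Bool.true_or, if_pos rfl, if_pos rfl]

-- A's outer fold is the filter-and-project of the matching categories.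
theorem pv_foldl_eq (comment : String) (items : List (String × List String)) (acc : List String) :
    items.foldl (fun acc p => pvScanKeywords comment acc p.1 p.2) acc
      = acc ++ (items.filter (fun p => p.2.any (fun k => PySem.Str.isIn k comment))).map (fun p => p.1) := by
  induction items generalizing acc with
  | nil => simp
  | cons p ps ih =>
    rw [List.foldl_cons, pvScanKeywords_eq, ih]
    simp only [List.filter_cons]
    cases h : p.2.any (fun k => PySem.Str.isIn k comment)
    · rw [if_neg Bool.false_ne_true, if_neg Bool.false_ne_true]
    · rw [if_pos rfl, if_pos rfl, List.map_cons, List.append_assoc, List.singleton_append]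

-- ===== VERDICT (by name: the statement is the Claim_ definition above) =====
theorem tag_pattern_category_spec : Claim_equal_tag_pattern_category := by
  intro comment patterns _
  unfold Spec_tag_pattern_category tag_pattern_category tag_pattern_category_alt
  rw [pv_foldl_eq]
  have hfil :
      ((PySem.Dict.ofList patterns).items.filter
          (fun p => p.2.any (fun k => PySem.Str.isIn k comment)))
        = (PySem.Dict.ofList patterns).items.filter
            (fun p => p.2.any (fun k => PySem.Set.contains
              (PySem.Set.ofList (((PySem.Set.ofList ((PySem.Dict.ofList patterns).items.flatMap
                  (fun p => p.2.map (fun k => PySem.Str.len k))) : PySem.Set Int)).flatMap (fun L =>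
                (PySem.List.pyRange 0 (PySem.Str.len comment - L + 1) 1).map
                  (fun i => PySem.Str.slice comment (some i) (some (i + L)))))) k)) := by
    apply List.filter_congr
    intro p hp
    refine pv_any_congr (fun k hkp => ?_)
    refine (pv_contains_index comment _ k ?_ ?_).symm
    · rw [PySem.Set.mem_ofList, List.mem_flatMap]
      exact ⟨p, hp, List.mem_map.mpr ⟨k, hkp, rfl⟩⟩
    · intro L hL
      rw [PySem.Set.mem_ofList, List.mem_flatMap] at hL
      rcases hL with ⟨q, _, hq⟩
      rw [List.mem_map] at hq
      rcases hq with ⟨w, _, hw⟩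
      rw [← hw, PySem.Str.len_eq]
      exact_mod_cast Nat.zero_le _
  rw [hfil]
  simp only [List.nil_append]
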